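-- pv_equiv track=rewrite | github.com/jungheeyang/Python-practice | Game_hangman_game.py | more_than_once
-- ===== SOURCE A (Python) =====
-- def more_than_once(char,word):
--     morethanonce = word.count(char)
--     count=0
--     charcount=[]
--     if morethanonce > 1:
--         for x in word:
--             if x == char:
--                 count += 1
--                 charcount.append(count-1)
--             else:
--                 count += 1
--
--     return charcount
-- ===== SOURCE B (Python) =====
-- def more_than_once(char, word):
--     # Different mechanism: instead of scanning each character, jump from match to
--     # match with str.find(char, pos) until it returns -1.  '==' in A only ever
--     # matches a single character, so non-length-1 needles yield no indices.
--     if len(char) != 1: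
--         return []
--     idxs = []
--     i = word.find(char)
--     while i >= 0:
--         idxs.append(i)
--         i = word.find(char, i + 1)
--     return idxs if len(idxs) > 1 else []
-- ===== Notes on version B (the rewrite author's own statement) =====
-- stated objective: alternative
-- what changed: B abandons A's per-character scan with a running counter: it hops between occurrences with repeated str.find(char, pos) calls until find returns -1, then keeps the collected positions only if there are at least two (a len(char)==1 guard makes substring search agree with A's single-character '==').
import Mathlib
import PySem

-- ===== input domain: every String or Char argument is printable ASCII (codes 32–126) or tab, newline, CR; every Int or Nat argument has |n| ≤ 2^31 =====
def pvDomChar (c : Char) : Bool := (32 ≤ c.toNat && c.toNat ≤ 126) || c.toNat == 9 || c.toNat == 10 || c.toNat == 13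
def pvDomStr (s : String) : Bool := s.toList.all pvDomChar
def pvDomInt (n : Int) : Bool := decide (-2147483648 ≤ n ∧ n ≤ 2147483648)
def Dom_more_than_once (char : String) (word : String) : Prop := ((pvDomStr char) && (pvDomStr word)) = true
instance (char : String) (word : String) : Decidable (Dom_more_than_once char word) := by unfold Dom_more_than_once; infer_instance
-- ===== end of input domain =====

-- B replaces A's per-character scan (count pre-pass + counter loop) by repeated
-- str.find jumps from match to match, keeping the positions only if at least two
-- were found (objective: alternative, same O(n) cost).


-- ===== PORT A =====
def more_than_once (char : String) (word : String) : List Int :=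
  let morethanonce := PySem.Str.count word char
  let count : Int := 0
  let charcount : List Int := []
  let st :=
    if morethanonce > 1 then
      word.toList.foldl
        (fun (st : Int × List Int) x =>
          if String.singleton x == char then (st.1 + 1, st.2 ++ [st.1 + 1 - 1])
          else (st.1 + 1, st.2))
        (count, charcount)
    else (count, charcount)
  st.2

-- ===== PORT B =====
-- B's while loop: i = word.find(char); while i >= 0: append i; i = word.find(char, i+1).
-- Totalised with fuel (word has at most |word| occurrences, so |word|+1 iterations suffice).
def pvFindLoop (char : String) (word : String) : Nat → Int → List Int → List Int
  | 0, _, idxs => idxs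
  | f + 1, i, idxs =>
    if i ≥ 0 then pvFindLoop char word f (PySem.Str.findFrom word char (i + 1)) (idxs ++ [i])
    else idxs

def more_than_once_alt (char : String) (word : String) : List Int :=
  if PySem.Str.len char ≠ 1 then []
  else
    let idxs := pvFindLoop char word (word.toList.length + 1) (PySem.Str.find word char) []
    if idxs.length > 1 then idxs else []

-- ===== PRECONDITION & SPEC =====
def Spec_more_than_once (char : String) (word : String) (out : List Int) : Prop := out = more_than_once_alt char word
instance (char : String) (word : String) (out : List Int) : Decidable (Spec_more_than_once char word out) := by unfold Spec_more_than_once; infer_instance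

-- ===== CLAIM (what is proved, stated in full; the proofs are below) =====
def Claim_equal_more_than_once : Prop := ∀ (char : String) (word : String), Dom_more_than_once char word → Spec_more_than_once char word (more_than_once char word)

-- ===== LEMMAS AND PROOFS =====

-- The matching indices in l from position `start` on (B's loop collects exactly these).
def pvOccs (c : Char) (l : List Char) (start : Nat) : List Int :=
  (PySem.List.enumerate (l.drop start) (start : Int)).filterMap
    (fun p => if p.2 == c then some p.1 else none)

-- PySem.Chars.count.go on a single-character needle is List.count (fuel-sufficient form).
theorem pv_go_singleton (c : Char) : ∀ (l : List Char) (fuel acc : Nat), l.length ≤ fuel →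
    PySem.Chars.count.go [c] fuel l acc = acc + l.count c := by
  intro l
  induction l with
  | nil => intro fuel acc h; cases fuel <;> simp [PySem.Chars.count.go]
  | cons x t ih =>
    intro fuel acc h
    match fuel with
    | 0 => simp at h
    | Nat.succ f =>
      rw [PySem.Chars.count.go]
      by_cases hx : x = c
      · subst hx
        simp [List.isPrefixOf, ih _ _ (by simpa using h)]
        ring
      · simp [List.isPrefixOf, hx, ih _ _ (by simpa using h), Ne.symm hx]

-- A's loop, characterised: final list = prefix ++ the filtered indices of the enumerate pass.
theorem pv_foldA (q : Char → Bool) : ∀ (l : List Char) (k : Int) (acc : List Int),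
    l.foldl
      (fun (st : Int × List Int) x =>
        if q x then (st.1 + 1, st.2 ++ [st.1 + 1 - 1]) else (st.1 + 1, st.2))
      (k, acc)
    = (k + l.length,
       acc ++ (PySem.List.enumerate l k).filterMap
         (fun p => if q p.2 then some p.1 else none)) := by
  intro l
  induction l with
  | nil => intro k acc; simp [PySem.List.enumerate_nil]
  | cons x t ih =>
    intro k acc
    simp only [List.foldl_cons, PySem.List.enumerate_cons, List.filterMap_cons]
    by_cases hx : q x
    · rw [if_pos hx, if_pos hx, ih (k + 1) (acc ++ [k + 1 - 1])]
      refine Prod.ext ?_ ?_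
      · simp; ring
      · simp
    · rw [if_neg hx, if_neg hx, ih (k + 1) acc]
      refine Prod.ext ?_ ?_
      · simp; ring
      · rfl

-- For a single-character char, the filtered index list has length = count of that character.
theorem pv_len_filter (q : Char → Bool) (c : Char) (hq : ∀ x : Char, q x = (x == c)) :
    ∀ (l : List Char) (k : Int),
    ((PySem.List.enumerate l k).filterMap
      (fun p => if q p.2 then some p.1 else none)).length = l.count c := by
  have hq' : q = fun x => x == c := funext hq
  subst hq'
  intro l
  induction l with
  | nil => intro k; simp [PySem.List.enumerate_nil]
  | cons x t ih =>
    intro k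
    simp only [PySem.List.enumerate_cons, List.filterMap_cons, List.count_cons]
    have ih' := ih (k + 1)
    simp only [beq_iff_eq] at ih'
    by_cases hx : x = c
    · simp [hx, ih']
    · simp [hx, ih']

theorem pv_singleton_eq (x : Char) (char : String) :
    (String.singleton x == char) = true ↔ char.toList = [x] := by
  rw [beq_iff_eq]
  constructor
  · intro h; rw [← h]; simp
  · intro h
    apply String.toList_injective
    simp [h]

theorem pv_singleton_prefix_iff (c : Char) (m : List Char) :
    [c] <+: m ↔ m[0]? = some c := by
  cases m with
  | nil => simp
  | cons x t => simp [List.cons_prefix_cons, eq_comm]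

-- No occurrence of c in m ⇒ the filtered enumerate pass is empty.
theorem pv_enum_nomatch (c : Char) (m : List Char) (k : Int)
    (h : ∀ x ∈ m, x ≠ c) :
    (PySem.List.enumerate m k).filterMap (fun p => if p.2 == c then some p.1 else none) = [] := by
  rw [List.filterMap_eq_nil_iff]
  intro p hp
  obtain ⟨j, hj, rfl⟩ := (PySem.List.mem_enumerate_iff _ _ _).mp hp
  simp [h _ (List.getElem_mem hj)]

-- First occurrence of c at index j ⇒ the filtered pass splits off k+j and continues after it.
theorem pv_enum_first (c : Char) : ∀ (j : Nat) (m : List Char) (k : Int),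
    m[j]? = some c → (∀ i, i < j → m[i]? ≠ some c) →
    (PySem.List.enumerate m k).filterMap (fun p => if p.2 == c then some p.1 else none)
      = (k + j) :: (PySem.List.enumerate (m.drop (j + 1)) (k + j + 1)).filterMap
          (fun p => if p.2 == c then some p.1 else none) := by
  intro j
  induction j with
  | zero =>
    intro m k h0 _
    cases m with
    | nil => simp at h0
    | cons x t =>
      simp only [List.getElem?_cons_zero, Option.some.injEq] at h0
      subst h0
      simp [PySem.List.enumerate_cons]
  | succ j ih =>
    intro m k hj hlt
    cases m with
    | nil => simp at hj
    | cons x t =>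
      have hx : x ≠ c := by
        intro hxc
        exact hlt 0 (Nat.succ_pos j) (by simp [hxc])
      have ht : t[j]? = some c := by simpa using hj
      have hlt' : ∀ i, i < j → t[i]? ≠ some c := by
        intro i hi
        have := hlt (i + 1) (by omega)
        simpa using this
      have ih' := ih t (k + 1) ht hlt'
      simp only [beq_iff_eq] at ih'
      simp only [PySem.List.enumerate_cons, List.filterMap_cons, beq_iff_eq, if_neg hx]
      rw [ih']
      have hd : List.drop (j + 1 + 1) (x :: t) = List.drop (j + 1) t := rfl
      rw [hd]
      have h1 : k + 1 + (j : Int) = k + ((j + 1 : Nat) : Int) := by push_cast; ring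
      rw [h1]

-- B's find loop, characterised: starting the search at `start`, it appends pvOccs.
theorem pv_loop_eq (c : Char) (char word : String) (hc : char.toList = [c]) :
    ∀ (fuel start : Nat) (acc : List Int), start ≤ word.toList.length →
    word.toList.length + 1 - start ≤ fuel →
    pvFindLoop char word fuel (PySem.Str.findFrom word char (start : Int)) acc
      = acc ++ pvOccs c word.toList start := by
  intro fuel
  induction fuel with
  | zero => intro start acc h1 h2; omega
  | succ f ih =>
    intro start acc h1 h2
    rw [PySem.Str.findFrom_eq, hc,
        PySem.Chars.findFrom_natCast word.toList [c] start h1]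
    set m := PySem.Chars.find (word.toList.drop start) [c] with hm
    by_cases hneg : m = -1
    · rw [if_pos hneg]
      have hnin : ¬ [c] <:+: word.toList.drop start :=
        (PySem.Chars.find_eq_neg_one_iff _ _).mp hneg
      have hno : ∀ x ∈ word.toList.drop start, x ≠ c := by
        intro x hx hxc
        obtain ⟨s, t, hst⟩ := List.append_of_mem hx
        rw [hxc] at hst
        exact hnin ⟨s, t, by rw [hst]; simp⟩
      show pvFindLoop char word (f + 1) (-1) acc = acc ++ pvOccs c word.toList start
      simp only [pvFindLoop]
      rw [if_neg (by omega)]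
      rw [pvOccs, pv_enum_nomatch c _ _ hno, List.append_nil]
    · rw [if_neg hneg]
      have hge : 0 ≤ m := by
        have := PySem.Chars.neg_one_le_find (word.toList.drop start) [c]
        rw [← hm] at this; omega
      obtain ⟨hpre, hfirst⟩ := PySem.Chars.find_spec (s := word.toList.drop start) (sub := [c]) (by rw [← hm]; exact hge)
      rw [← hm] at hpre hfirst
      have hjget : (word.toList.drop start)[m.toNat]? = some c := by
        have h0 := (pv_singleton_prefix_iff c _).mp hpre
        rw [List.getElem?_drop] at h0
        simpa using h0
      have hjlt : m.toNat < (word.toList.drop start).length := by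
        have := List.getElem?_eq_some_iff.mp hjget
        exact this.1
      have hjlen : start + m.toNat + 1 ≤ word.toList.length := by
        rw [List.length_drop] at hjlt; omega
      have hfirst' : ∀ i, i < m.toNat → (word.toList.drop start)[i]? ≠ some c := by
        intro i hi hig
        apply hfirst i hi
        apply (pv_singleton_prefix_iff c _).mpr
        rw [List.getElem?_drop]
        simpa using hig
      -- split pvOccs at the first occurrence
      have hsplit : pvOccs c word.toList start
          = ((start : Int) + m) :: pvOccs c word.toList (start + m.toNat + 1) := by
        rw [pvOccs, pv_enum_first c m.toNat _ _ hjget hfirst']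
        rw [pvOccs]
        have hd : (word.toList.drop start).drop (m.toNat + 1)
            = word.toList.drop (start + m.toNat + 1) := by
          rw [List.drop_drop, Nat.add_assoc]
        rw [hd]
        have e1 : (start : Int) + (m.toNat : Int) = (start : Int) + m := by
          rw [Int.toNat_of_nonneg hge]
        rw [e1]
        have e3 : (start : Int) + m + 1 = ((start + m.toNat + 1 : Nat) : Int) := by
          push_cast [Int.toNat_of_nonneg hge]; ring
        rw [e3]
      show pvFindLoop char word (f + 1) ((start : Int) + m) acc = acc ++ pvOccs c word.toList start
      simp only [pvFindLoop]
      rw [if_pos (by omega)]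
      have harg : (start : Int) + m + 1 = ((start + m.toNat + 1 : Nat) : Int) := by
        push_cast [Int.toNat_of_nonneg hge]; ring
      rw [harg, ih (start + m.toNat + 1) (acc ++ [(start : Int) + m]) hjlen (by omega)]
      rw [hsplit]
      simp

theorem pv_main (char word : String) : more_than_once char word = more_than_once_alt char word := by
  unfold more_than_once more_than_once_alt
  simp only [gt_iff_lt]
  by_cases hc : ∃ c, char.toList = [c]
  · obtain ⟨c, hc⟩ := hc
    have hlen1 : PySem.Str.len char = 1 := by rw [PySem.Str.len_eq, hc]; rfl
    rw [if_neg (show ¬(PySem.Str.len char ≠ 1) from fun h => h hlen1)]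
    have hbeq : ∀ x : Char, (String.singleton x == char) = (x == c) := by
      intro x
      by_cases hx : x = c
      · subst hx
        simp [(pv_singleton_eq x char).mpr hc]
      · have h1 : (String.singleton x == char) = false := by
          cases hxx : (String.singleton x == char)
          · rfl
          · have := (pv_singleton_eq x char).mp hxx
            rw [hc] at this
            simp at this
            exact absurd this.symm hx
        simp [h1, hx]
    have hcount : PySem.Str.count word char = word.toList.count c := by
      rw [PySem.Str.count_eq, hc]
      unfold PySem.Chars.count
      simpa using pv_go_singleton c word.toList word.toList.length 0 le_rfl
    -- B's loop computes the filtered enumerate pass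
    have hfind0 : PySem.Str.find word char
        = PySem.Str.findFrom word char ((0 : Nat) : Int) := by
      rw [PySem.Str.findFrom_eq, PySem.Str.find_eq]
      rw [show (((0 : Nat) : Int)) = (0 : Int) from rfl, PySem.Chars.findFrom_zero]
    have hloop : pvFindLoop char word (word.toList.length + 1) (PySem.Str.find word char) []
        = pvOccs c word.toList 0 := by
      rw [hfind0, pv_loop_eq c char word hc (word.toList.length + 1) 0 []
        (Nat.zero_le _) (by omega)]
      rfl
    have hocc0 : pvOccs c word.toList 0
        = (PySem.List.enumerate word.toList 0).filterMap
            (fun p => if p.2 == c then some p.1 else none) := by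
      rw [pvOccs, List.drop_zero]; rfl
    simp only [hloop, hocc0, hcount]
    have hlenf := pv_len_filter (fun x => x == c) c (fun _ => rfl) word.toList 0
    simp only [hbeq]
    rw [hlenf]
    by_cases hgt : 1 < word.toList.count c
    · rw [if_pos hgt, if_pos hgt,
        pv_foldA (fun x => x == c) word.toList 0 []]
      simp
    · rw [if_neg hgt, if_neg hgt]
  · -- char is not a single character: no loop element ever matches, both sides return []
    have hlen : PySem.Str.len char ≠ 1 := by
      rw [PySem.Str.len_eq]
      intro h
      have : char.toList.length = 1 := by exact_mod_cast h
      obtain ⟨a, ha⟩ := List.length_eq_one_iff.mp this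
      exact hc ⟨a, ha⟩
    rw [if_pos hlen]
    have hnone : ∀ x : Char, (String.singleton x == char) = false := by
      intro x
      cases hxx : (String.singleton x == char)
      · rfl
      · exact absurd ⟨x, (pv_singleton_eq x char).mp hxx⟩ hc
    by_cases hgt : 1 < PySem.Str.count word char
    · rw [if_pos hgt, pv_foldA (fun x => String.singleton x == char) word.toList 0 []]
      show [] ++ _ = ([] : List Int)
      rw [List.nil_append, List.filterMap_eq_nil_iff]
      intro p _
      simp [hnone p.2]
    · rw [if_neg hgt]

-- ===== VERDICT (by name: the statement is the Claim_ definition above) =====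
theorem more_than_once_spec : Claim_equal_more_than_once := by
  intro char word _
  unfold Spec_more_than_once
  exact pv_main char word
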